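-- pv_equiv track=rewrite | github.com/ToxToxx/VKED | AISD/DinamicProgramming/zadMemoization.py | max_product_memoization
-- ===== SOURCE A (Python) =====
-- def max_product_memoization(nums, k, index, remaining, memo):
--     """
--     Рекурсивная функция с мемоизацией для вычисления максимального произведения подпоследовательности.
--
--     :param nums: Исходный массив чисел
--     :param k: Количество элементов в подпоследовательности
--     :param index: Текущий индекс в массиве
--     :param remaining: Сколько еще элементов нужно выбрать
--     :param memo: Словарь для хранения результатов вычислений
--     :return: Максимальное произведение подпоследовательности
--     """
--     # Базовый случай: если необходимо выбрать 0 элементов или дошли до конца массива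
--     if remaining == 0 or index >= len(nums):
--         return 1
--
--     # Проверяем, есть ли результат в мемоизированном словаре
--     if (index, remaining) in memo:
--         return memo[(index, remaining)]
--
--     # Включаем текущий элемент в подпоследовательность
--     include_current = nums[index] * max_product_memoization(nums, k, index + 1, remaining - 1, memo)
--
--     # Пропускаем текущий элемент
--     exclude_current = max_product_memoization(nums, k, index + 1, remaining, memo)
--
--     # Выбираем максимальное произведение
--     result = max(include_current, exclude_current)
--
--     # Сохраняем результат в мемоизированный словарь
--     memo[(index, remaining)] = result
--
--     return result
-- ===== SOURCE B (Python) =====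
-- def max_product_memoization(nums, k, index, remaining, memo):
--     # Bottom-up DP over the reachable states, consulting the supplied memo
--     # as a read-only cache of already-known results (it is not mutated).
--     n = len(nums)
--     if remaining == 0 or index >= n:
--         return 1
--     if (index, remaining) in memo:
--         return memo[(index, remaining)]
--
--     def value(col, i, r):
--         # best product from state (i, r): base case, cached result, or the
--         # entry computed for level i in the previous column
--         if r == 0 or i >= n:
--             return 1
--         if (i, r) in memo:
--             return memo[(i, r)]
--         return col[r]
--
--     col = {}
--     for i in range(n - 1, index - 1, -1):
--         col = {remaining - d: max(nums[i] * value(col, i + 1, remaining - d - 1),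
--                                   value(col, i + 1, remaining - d))
--                for d in range(i - index + 1)
--                if remaining - d != 0}
--     return col[remaining]
-- ===== Notes on version B (the rewrite author's own statement) =====
-- stated objective: alternative
-- what changed: Top-down memoized recursion (mutating the memo dict) is replaced by an iterative bottom-up DP that sweeps levels i = n-1..index, keeping only the current column of reachable states and consulting the given memo as a read-only cache; B does not mutate memo (return-value equivalence); Pre_ excludes only the inputs where both programs raise IndexError (index < -len(nums) with the computation actually reaching nums[index]).
import Mathlib
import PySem

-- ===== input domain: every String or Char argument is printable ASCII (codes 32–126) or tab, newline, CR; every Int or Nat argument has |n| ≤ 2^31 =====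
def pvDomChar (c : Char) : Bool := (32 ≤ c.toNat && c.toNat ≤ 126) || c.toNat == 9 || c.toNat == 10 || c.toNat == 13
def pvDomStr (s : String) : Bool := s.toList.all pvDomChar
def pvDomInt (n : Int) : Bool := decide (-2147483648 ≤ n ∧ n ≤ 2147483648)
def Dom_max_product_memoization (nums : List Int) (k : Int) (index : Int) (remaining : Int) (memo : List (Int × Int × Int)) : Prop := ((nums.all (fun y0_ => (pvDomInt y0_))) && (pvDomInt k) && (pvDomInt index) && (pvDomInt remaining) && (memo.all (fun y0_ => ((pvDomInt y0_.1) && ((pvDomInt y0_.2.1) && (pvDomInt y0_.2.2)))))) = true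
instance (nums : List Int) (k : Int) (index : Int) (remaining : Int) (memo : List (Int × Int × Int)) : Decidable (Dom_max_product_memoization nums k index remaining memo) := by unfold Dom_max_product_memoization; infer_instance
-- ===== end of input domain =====

-- B replaces A's top-down memoized recursion (which mutates the memo dict) by an
-- iterative bottom-up DP over one column of states per level, consulting the given
-- memo read-only; equivalence is about the RETURN value only (A mutates memo, B does not).

-- ===== PORT A =====
-- memo is dict[(int,int) -> int], flattened to (index, remaining, value) triples;
-- lookup = first match on the key pair.
def mlookup (memo : List (Int × Int × Int)) (i r : Int) : Option Int :=
  (memo.find? (fun e => e.1 == i && e.2.1 == r)).map (fun e => e.2.2)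

-- A's recursion, threading the mutated memo; the write memo[(index,remaining)] = result
-- happens only when the key is absent, so it appends.  nums[index] is pyGet? with
-- default 0: the default is only reached where Python A raises IndexError (outside Pre_).
def goA (nums : List Int) (k : Int) (index : Int) (remaining : Int)
    (m : List (Int × Int × Int)) : Int × List (Int × Int × Int) :=
  if remaining = 0 ∨ (nums.length : Int) ≤ index then (1, m)
  else
    match mlookup m index remaining with
    | some v => (v, m)
    | none =>
      let p1 := goA nums k (index + 1) (remaining - 1) m
      let include_current := ((PySem.List.pyGet? nums index).getD 0) * p1.1
      let p2 := goA nums k (index + 1) remaining p1.2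
      let result := max include_current p2.1
      (result, p2.2 ++ [(index, remaining, result)])
termination_by (nums.length - index).toNat
decreasing_by all_goals omega

def max_product_memoization (nums : List Int) (k : Int) (index : Int) (remaining : Int) (memo : List (Int × Int × Int)) : Int :=
  (goA nums k index remaining memo).1

-- ===== PORT B =====
-- Source B's local value(col, i, r): base case, then the read-only memo, then col[r]
-- (col.get? with default 0; the key is always present at reachable call sites).
def lookB (nums : List Int) (memo : List (Int × Int × Int)) (col : PySem.Dict Int Int)
    (i : Int) (r : Int) : Int :=
  if r = 0 ∨ (nums.length : Int) ≤ i then 1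
  else
    match mlookup memo i r with
    | some v => v
    | none => (col.get? r).getD 0

-- body of Source B's outer loop: the dict comprehension building the column for level i
-- from the column for i + 1 (comprehension = fold inserting each kept key)
def colStep (nums : List Int) (memo : List (Int × Int × Int)) (index : Int) (remaining : Int)
    (col : PySem.Dict Int Int) (i : Int) : PySem.Dict Int Int :=
  (PySem.List.pyRange 0 (i - index + 1) 1).foldl
    (fun nc d =>
      let r := remaining - d
      if r ≠ 0 then
        nc.insert r (max (((PySem.List.pyGet? nums i).getD 0) * lookB nums memo col (i + 1) (r - 1))
                         (lookB nums memo col (i + 1) r))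
      else nc)
    PySem.Dict.empty

def max_product_memoization_alt (nums : List Int) (k : Int) (index : Int) (remaining : Int) (memo : List (Int × Int × Int)) : Int :=
  if remaining = 0 ∨ (nums.length : Int) ≤ index then 1
  else
    match mlookup memo index remaining with
    | some v => v
    | none =>
      let col := ((PySem.List.pyRange index (nums.length : Int) 1).reverse).foldl
        (colStep nums memo index remaining) PySem.Dict.empty
      (col.get? remaining).getD 0

-- ===== PRECONDITION & SPEC =====
-- Pre_ excludes exactly the inputs on which Python A raises IndexError: nums[index]
-- with index < -len(nums) (reached iff remaining ≠ 0 and (index, remaining) misses memo);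
-- Python B raises IndexError there too.  The Lean ports are total (an out-of-range read
-- yields the default 0) and happen to agree on all inputs, so the proofs below do not
-- need the hypothesis.
def Pre_max_product_memoization (nums : List Int) (k : Int) (index : Int) (remaining : Int) (memo : List (Int × Int × Int)) : Prop :=
  ¬ (index < -(nums.length : Int) ∧ remaining ≠ 0 ∧ mlookup memo index remaining = none)
instance (nums : List Int) (k : Int) (index : Int) (remaining : Int) (memo : List (Int × Int × Int)) : Decidable (Pre_max_product_memoization nums k index remaining memo) := by unfold Pre_max_product_memoization; infer_instance

def pvWitness_max_product_memoization : List Int × Int × Int × Int × (List (Int × Int × Int)) :=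
  ([2, -3, 4], 2, 0, 2, [])

def Spec_max_product_memoization (nums : List Int) (k : Int) (index : Int) (remaining : Int) (memo : List (Int × Int × Int)) (out : Int) : Prop := out = max_product_memoization_alt nums k index remaining memo
instance (nums : List Int) (k : Int) (index : Int) (remaining : Int) (memo : List (Int × Int × Int)) (out : Int) : Decidable (Spec_max_product_memoization nums k index remaining memo out) := by unfold Spec_max_product_memoization; infer_instance

-- ===== CLAIM (what is proved, stated in full; the proofs are below) =====
def Claim_equal_max_product_memoization : Prop := ∀ (nums : List Int) (k : Int) (index : Int) (remaining : Int) (memo : List (Int × Int × Int)), Dom_max_product_memoization nums k index remaining memo → Pre_max_product_memoization nums k index remaining memo → Spec_max_product_memoization nums k index remaining memo (max_product_memoization nums k index remaining memo)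

-- ===== LEMMAS AND PROOFS =====

-- the common pure value: A's recursion with the ORIGINAL memo as a read-only oracle
def Fmem (nums : List Int) (memo : List (Int × Int × Int)) (i : Int) (r : Int) : Int :=
  if r = 0 ∨ (nums.length : Int) ≤ i then 1
  else
    match mlookup memo i r with
    | some v => v
    | none => max (((PySem.List.pyGet? nums i).getD 0) * Fmem nums memo (i + 1) (r - 1))
                  (Fmem nums memo (i + 1) r)
termination_by (nums.length - i).toNat
decreasing_by all_goals omega

-- A only appends entries for keys absent from memo, with value Fmem
def ExtOf (nums : List Int) (memo m : List (Int × Int × Int)) : Prop :=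
  ∃ extra, m = memo ++ extra ∧
    ∀ e ∈ extra, mlookup memo e.1 e.2.1 = none ∧ e.2.2 = Fmem nums memo e.1 e.2.1

theorem mlookup_append (a b : List (Int × Int × Int)) (i r : Int) :
    mlookup (a ++ b) i r = (mlookup a i r).or (mlookup b i r) := by
  simp [mlookup, List.find?_append, Option.map_or]

theorem mlookup_extra {nums : List Int} {memo extra : List (Int × Int × Int)} {i r v : Int}
    (hx : ∀ e ∈ extra, mlookup memo e.1 e.2.1 = none ∧ e.2.2 = Fmem nums memo e.1 e.2.1)
    (h : mlookup extra i r = some v) : v = Fmem nums memo i r := by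
  unfold mlookup at h
  obtain ⟨e, hfind, hmap⟩ := Option.map_eq_some_iff.mp h
  have hmem := List.mem_of_find?_eq_some hfind
  have hp := List.find?_some hfind
  simp only [Bool.and_eq_true, beq_iff_eq] at hp
  obtain ⟨h1, h2⟩ := hp
  have := (hx e hmem).2
  rw [h1, h2] at this
  omega

theorem goA_eq (nums : List Int) (memo : List (Int × Int × Int)) (k : Int) :
    ∀ (N : ℕ) (i r : Int) (m : List (Int × Int × Int)),
      (nums.length - i).toNat ≤ N → ExtOf nums memo m →
      (goA nums k i r m).1 = Fmem nums memo i r ∧ ExtOf nums memo (goA nums k i r m).2 := by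
  intro N
  induction N with
  | zero =>
    intro i r m hN hext
    have hbase : (nums.length : Int) ≤ i := by omega
    rw [goA]
    constructor
    · rw [Fmem]; simp [hbase]
    · simpa [hbase] using hext
  | succ N ih =>
    intro i r m hN hext
    rw [goA]
    by_cases hb : r = 0 ∨ (nums.length : Int) ≤ i
    · refine ⟨?_, by simpa [hb] using hext⟩
      rw [Fmem]; simp [hb]
    · simp only [hb, if_false]
      obtain ⟨extra, hm, hx⟩ := hext
      have hml : mlookup m i r = (mlookup memo i r).or (mlookup extra i r) := by
        rw [hm]; exact mlookup_append memo extra i r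
      cases hmm : mlookup m i r with
      | some v =>
        -- memo hit in the threaded dict
        refine ⟨?_, ⟨extra, hm, hx⟩⟩
        cases h0 : mlookup memo i r with
        | some w =>
          have hvw : v = w := by rw [hml, h0] at hmm; simpa using hmm.symm
          subst hvw
          rw [Fmem]; simp [hb, h0]
        | none =>
          have hex : mlookup extra i r = some v := by rw [hml, h0] at hmm; simpa using hmm
          exact mlookup_extra hx hex
      | none =>
        -- miss everywhere: memo itself misses too
        have h0 : mlookup memo i r = none := by
          rw [hml] at hmm
          cases h : mlookup memo i r with
          | none => rfl
          | some w => rw [h] at hmm; simp at hmm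
        have hF : Fmem nums memo i r
            = max (((PySem.List.pyGet? nums i).getD 0) * Fmem nums memo (i + 1) (r - 1))
                  (Fmem nums memo (i + 1) r) := by
          rw [Fmem]; simp [hb, h0]
        have hN1 : (nums.length - (i + 1)).toNat ≤ N := by omega
        obtain ⟨hv1, hext1⟩ := ih (i + 1) (r - 1) m hN1 ⟨extra, hm, hx⟩
        obtain ⟨hv2, hext2⟩ := ih (i + 1) r _ hN1 hext1
        obtain ⟨extra2, hm2, hx2⟩ := hext2
        constructor
        · show max (((PySem.List.pyGet? nums i).getD 0) * (goA nums k (i + 1) (r - 1) m).1)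
              ((goA nums k (i + 1) r (goA nums k (i + 1) (r - 1) m).2).1) = Fmem nums memo i r
          rw [hv1, hv2, hF]
        · refine ⟨extra2 ++ [(i, r, max (((PySem.List.pyGet? nums i).getD 0) *
              (goA nums k (i + 1) (r - 1) m).1) ((goA nums k (i + 1) r (goA nums k (i + 1) (r - 1) m).2).1))], ?_, ?_⟩
          · show (goA nums k (i + 1) r (goA nums k (i + 1) (r - 1) m).2).2 ++ _ = _
            rw [hm2, List.append_assoc]
          · intro e he
            rcases List.mem_append.mp he with h | h
            · exact hx2 e h
            · simp only [List.mem_singleton] at h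
              subst h
              refine ⟨h0, ?_⟩
              show max (((PySem.List.pyGet? nums i).getD 0) * (goA nums k (i + 1) (r - 1) m).1)
                  ((goA nums k (i + 1) r (goA nums k (i + 1) (r - 1) m).2).1) = Fmem nums memo i r
              rw [hv1, hv2, hF]

-- B side: the column after processing levels n-1 .. i
def colAfter (nums : List Int) (memo : List (Int × Int × Int)) (index remaining i : Int) :
    PySem.Dict Int Int :=
  ((PySem.List.pyRange i (nums.length : Int) 1).reverse).foldl
    (colStep nums memo index remaining) PySem.Dict.empty

-- the inner fold leaves keys it never inserts alone
theorem inner_frozen (remaining : Int) (G : Int → Int) :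
    ∀ (ds : List Int) (nc : PySem.Dict Int Int) (key : Int),
      (∀ d ∈ ds, remaining - d ≠ key) →
      (ds.foldl (fun nc d =>
          if remaining - d ≠ 0 then nc.insert (remaining - d) (G d) else nc) nc).get? key
        = nc.get? key := by
  intro ds
  induction ds with
  | nil => intro nc key _; rfl
  | cons d0 t ih =>
    intro nc key hne
    simp only [List.foldl_cons]
    rw [ih _ key (fun d hd => hne d (List.mem_cons_of_mem _ hd))]
    by_cases h0 : remaining - d0 ≠ 0
    · rw [if_pos h0]
      exact PySem.Dict.get?_insert_of_ne _ _ (fun h => hne d0 List.mem_cons_self h.symm)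
    · simp [h0]

-- the inner fold stores G d at key remaining - d (last occurrence wins)
theorem inner_get (remaining : Int) (G : Int → Int) :
    ∀ (ds : List Int) (nc : PySem.Dict Int Int) (d : Int),
      d ∈ ds → remaining - d ≠ 0 →
      (ds.foldl (fun nc d =>
          if remaining - d ≠ 0 then nc.insert (remaining - d) (G d) else nc) nc).get?
          (remaining - d) = some (G d) := by
  intro ds
  induction ds with
  | nil => intro nc d h; exact absurd h (List.not_mem_nil)
  | cons d0 t ih =>
    intro nc d hmem hr
    by_cases ht : d ∈ t
    · simp only [List.foldl_cons]
      exact ih _ d ht hr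
    · have hd0 : d = d0 := by
        rcases List.mem_cons.mp hmem with h | h
        · exact h
        · exact absurd h ht
      subst hd0
      simp only [List.foldl_cons]
      rw [inner_frozen remaining G t _ (remaining - d) (fun d' hd' h => ht (by
        have : d' = d := by omega
        rwa [this] at hd')), if_pos hr]
      exact PySem.Dict.get?_insert_self nc (remaining - d) (G d)

theorem col_good (nums : List Int) (memo : List (Int × Int × Int)) (index remaining : Int) :
    ∀ (N : ℕ) (i : Int), index ≤ i → i ≤ (nums.length : Int) → (nums.length - i).toNat ≤ N →
      ∀ d : Int, 0 ≤ d → d ≤ i - index →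
        lookB nums memo (colAfter nums memo index remaining i) i (remaining - d)
          = Fmem nums memo i (remaining - d) := by
  intro N
  induction N with
  | zero =>
    intro i _ _ hN d _ _
    have hbase : (nums.length : Int) ≤ i := by omega
    rw [lookB, Fmem]
    simp [hbase]
  | succ N ih =>
    intro i hlo hhi hN d hd0 hdmax
    by_cases hi : (nums.length : Int) ≤ i
    · rw [lookB, Fmem]; simp [hi]
    · have hstep : colAfter nums memo index remaining i
          = colStep nums memo index remaining (colAfter nums memo index remaining (i + 1)) i := by
        unfold colAfter
        rw [PySem.List.pyRange_one_cons (by omega)]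
        simp [List.foldl_append]
      rw [lookB, Fmem]
      by_cases hb : remaining - d = 0 ∨ (nums.length : Int) ≤ i
      · simp [hb]
      · simp only [hb, if_false]
        cases h0 : mlookup memo i (remaining - d) with
        | some v => rfl
        | none =>
          simp only []
          have hr0 : remaining - d ≠ 0 := by tauto
          -- value stored by the inner fold at this key
          have hget : (colStep nums memo index remaining
                (colAfter nums memo index remaining (i + 1)) i).get? (remaining - d)
              = some (max (((PySem.List.pyGet? nums i).getD 0) *
                  lookB nums memo (colAfter nums memo index remaining (i + 1)) (i + 1) (remaining - d - 1))
                  (lookB nums memo (colAfter nums memo index remaining (i + 1)) (i + 1) (remaining - d))) := by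
            unfold colStep
            have hdm : d ∈ PySem.List.pyRange 0 (i - index + 1) 1 := by
              rw [PySem.List.mem_pyRange_one]
              exact ⟨hd0, by omega⟩
            exact inner_get remaining _ _ _ d hdm hr0
          have hN1 : (nums.length - (i + 1)).toNat ≤ N := by omega
          have e1 := ih (i + 1) (by omega) (by omega) hN1 d hd0 (by omega)
          have e2 := ih (i + 1) (by omega) (by omega) hN1 (d + 1) (by omega) (by omega)
          have e2' : lookB nums memo (colAfter nums memo index remaining (i + 1)) (i + 1) (remaining - d - 1)
              = Fmem nums memo (i + 1) (remaining - d - 1) := by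
            have : remaining - (d + 1) = remaining - d - 1 := by ring
            rwa [this] at e2
          rw [hstep, hget]
          simp only [Option.getD_some]
          rw [e1, e2']

theorem alt_eq_Fmem (nums : List Int) (k index remaining : Int) (memo : List (Int × Int × Int)) :
    max_product_memoization_alt nums k index remaining memo = Fmem nums memo index remaining := by
  rw [max_product_memoization_alt]
  by_cases hb : remaining = 0 ∨ (nums.length : Int) ≤ index
  · rw [if_pos hb, Fmem, if_pos hb]
  · rw [if_neg hb]
    cases h0 : mlookup memo index remaining with
    | some v => rw [Fmem, if_neg hb, h0]
    | none =>
      have hg := col_good nums memo index remaining (nums.length - index).toNat index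
        (le_refl _) (by omega) (le_refl _) 0 (le_refl _) (by omega)
      simp only [sub_zero] at hg
      rw [lookB, if_neg hb, h0] at hg
      unfold colAfter at hg
      exact hg

-- ===== VERDICT (by name: the statement is the Claim_ definition above) =====
theorem max_product_memoization_spec : Claim_equal_max_product_memoization := by
  intro nums k index remaining memo _ _
  unfold Spec_max_product_memoization max_product_memoization
  rw [alt_eq_Fmem]
  exact (goA_eq nums memo k (nums.length - index).toNat index remaining memo (le_refl _)
    ⟨[], by simp, by simp⟩).1
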